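-- pv_equiv track=rewrite | github.com/danillo-alvarenga/tn3-ta_finder | Tn3+TA_finder.py | unduplicate
-- ===== SOURCE A (Python) =====
-- from itertools import combinations
--
-- def unduplicate(features):
--
--     for x, y in combinations(features, 2):
--         if x in features and (x[0] - 100 < y[0] < x[0] + 100 or \
--                               x[1] - 100 < y[1] < x[1] + 100) and \
--                               x[3] < y[3]:
--             features.remove(x)
--         if y in features and (y[0] - 100 < x[0] < y[0] + 100 or \
--                               y[1] - 100 < x[1] < y[1] + 100) and \
--                               y[3] < x[3]:
--             features.remove(y)
--
--     return features
-- ===== SOURCE B (Python) =====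
-- def unduplicate(features):
--     snapshot = list(features)
--     features[:] = [f for f in snapshot
--                    if not any((abs(f[0] - g[0]) < 100 or abs(f[1] - g[1]) < 100) and f[3] < g[3]
--                               for g in snapshot)]
--     return features
-- ===== Notes on version B (the rewrite author's own statement) =====
-- stated objective: faster
-- what changed: Replaces the pairwise mutate-while-iterating loop (combinations + repeated 'in'/remove scans) by a single filter: keep a feature iff no feature in the original list is within 100 on either coordinate and has a larger rank.
import Mathlib
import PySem

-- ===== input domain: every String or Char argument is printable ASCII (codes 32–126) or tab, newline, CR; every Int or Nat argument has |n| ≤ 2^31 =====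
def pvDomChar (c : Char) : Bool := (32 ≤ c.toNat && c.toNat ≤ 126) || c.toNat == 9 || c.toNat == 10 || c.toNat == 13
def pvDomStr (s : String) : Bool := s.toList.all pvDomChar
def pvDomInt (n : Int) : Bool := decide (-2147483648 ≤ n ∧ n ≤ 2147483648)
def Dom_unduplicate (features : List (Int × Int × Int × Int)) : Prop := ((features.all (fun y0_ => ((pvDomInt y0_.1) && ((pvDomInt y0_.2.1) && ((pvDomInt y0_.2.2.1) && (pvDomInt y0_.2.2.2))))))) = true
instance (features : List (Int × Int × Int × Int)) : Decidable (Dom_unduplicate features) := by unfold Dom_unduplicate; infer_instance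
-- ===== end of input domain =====

-- B replaces A's pairwise mutate-while-iterating removal loop by one filter over the original
-- list (measurably faster on large inputs). A mutates its argument in place; the equivalence
-- proved here is about the RETURN value (B performs a matching in-place update, features[:] = ...).

-- ===== PORT A =====
-- itertools.combinations(features, 2): all pairs (features[i], features[j]), i < j, in order
-- (combinations snapshots the list when the loop starts, before any removal).
def pvCombos (l : List (Int × Int × Int × Int)) : List ((Int × Int × Int × Int) × (Int × Int × Int × Int)) :=
  match l with
  | [] => []
  | x :: rest => rest.map (fun y => (x, y)) ++ pvCombos rest

-- x[0] - 100 < y[0] < x[0] + 100 or x[1] - 100 < y[1] < x[1] + 100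
def pvClose (x y : Int × Int × Int × Int) : Bool :=
  (decide (x.1 - 100 < y.1) && decide (y.1 < x.1 + 100)) ||
  (decide (x.2.1 - 100 < y.2.1) && decide (y.2.1 < x.2.1 + 100))

-- second guarded remove of the loop body ('y in features ... features.remove(y)')
def pvStep2 (fs1 : List (Int × Int × Int × Int))
    (q : (Int × Int × Int × Int) × (Int × Int × Int × Int)) : List (Int × Int × Int × Int) :=
  if fs1.contains q.2 && pvClose q.2 q.1 && decide (q.2.2.2.2 < q.1.2.2.2)
  then fs1.erase q.2 else fs1

-- one iteration of A's for-loop body (two guarded removes; list.remove = List.erase)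
def pvStep (fs : List (Int × Int × Int × Int))
    (q : (Int × Int × Int × Int) × (Int × Int × Int × Int)) : List (Int × Int × Int × Int) :=
  pvStep2 (if fs.contains q.1 && pvClose q.1 q.2 && decide (q.1.2.2.2 < q.2.2.2.2)
           then fs.erase q.1 else fs) q

def unduplicate (features : List (Int × Int × Int × Int)) : List (Int × Int × Int × Int) :=
  (pvCombos features).foldl pvStep features

-- ===== PORT B =====
-- (abs(f[0]-g[0]) < 100 or abs(f[1]-g[1]) < 100) and f[3] < g[3]
def pvBeats (f g : Int × Int × Int × Int) : Bool :=
  (decide ((f.1 - g.1).natAbs < 100) || decide ((f.2.1 - g.2.1).natAbs < 100)) &&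
  decide (f.2.2.2 < g.2.2.2)

def unduplicate_alt (features : List (Int × Int × Int × Int)) : List (Int × Int × Int × Int) :=
  features.filter (fun f => !(features.any (fun g => pvBeats f g)))

-- ===== PRECONDITION & SPEC =====
def Spec_unduplicate (features : List (Int × Int × Int × Int)) (out : List (Int × Int × Int × Int)) : Prop := out = unduplicate_alt features
instance (features : List (Int × Int × Int × Int)) (out : List (Int × Int × Int × Int)) : Decidable (Spec_unduplicate features out) := by unfold Spec_unduplicate; infer_instance

-- ===== CLAIM (what is proved, stated in full; the proofs are below) =====
def Claim_equal_unduplicate : Prop := ∀ (features : List (Int × Int × Int × Int)), Dom_unduplicate features → Spec_unduplicate features (unduplicate features)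

-- ===== LEMMAS AND PROOFS =====

-- "pair condition of A": x is close to y and has the smaller rank
def pvC (x y : Int × Int × Int × Int) : Bool :=
  pvClose x y && decide (x.2.2.2 < y.2.2.2)

lemma pvC_eq_dominates (f g : Int × Int × Int × Int) : pvBeats f g = pvC f g := by
  simp only [pvBeats, pvC, pvClose, ← Bool.decide_and, ← Bool.decide_or, decide_eq_decide]
  omega

lemma pvC_self (v : Int × Int × Int × Int) : pvC v v = false := by
  simp [pvC]

-- trigger count: the pairs of p that would remove (a copy of) v when processed
def pvTrig (v : Int × Int × Int × Int)
    (p : List ((Int × Int × Int × Int) × (Int × Int × Int × Int))) : Nat :=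
  p.countP (fun q => (q.1 == v && pvC v q.2) || (q.2 == v && pvC v q.1))

lemma pvStep2_count_le (v : Int × Int × Int × Int) (t : List (Int × Int × Int × Int))
    (q : (Int × Int × Int × Int) × (Int × Int × Int × Int)) :
    (pvStep2 t q).count v ≤ t.count v := by
  unfold pvStep2
  split
  · exact List.Sublist.count_le v (List.erase_sublist)
  · exact le_refl _

lemma pvStep_count_le (v : Int × Int × Int × Int) (s : List (Int × Int × Int × Int))
    (q : (Int × Int × Int × Int) × (Int × Int × Int × Int)) :
    (pvStep s q).count v ≤ s.count v := by
  unfold pvStep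
  refine Nat.le_trans (pvStep2_count_le v _ q) ?_
  split
  · exact List.Sublist.count_le v (List.erase_sublist)
  · exact le_refl _

-- a non-trigger pair never changes v's multiplicity
lemma pvStep_count_eq (v : Int × Int × Int × Int) (s : List (Int × Int × Int × Int))
    (q : (Int × Int × Int × Int) × (Int × Int × Int × Int))
    (h : ((q.1 == v && pvC v q.2) || (q.2 == v && pvC v q.1)) = false) :
    (pvStep s q).count v = s.count v := by
  obtain ⟨x, y⟩ := q
  simp only [Bool.or_eq_false_iff, Bool.and_eq_false_iff, beq_eq_false_iff_ne] at h
  have ne1 : pvC x y = true → v ≠ x := by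
    intro hc he
    rcases h.1 with h1 | h1
    · exact h1 he.symm
    · rw [← he] at hc
      rw [h1] at hc
      exact Bool.false_ne_true hc
  have ne2 : pvC y x = true → v ≠ y := by
    intro hc he
    rcases h.2 with h1 | h1
    · exact h1 he.symm
    · rw [← he] at hc
      rw [h1] at hc
      exact Bool.false_ne_true hc
  have h2 : ∀ t : List (Int × Int × Int × Int), (pvStep2 t (x, y)).count v = t.count v := by
    intro t
    unfold pvStep2
    split
    · rename_i hcnd
      simp only [Bool.and_eq_true] at hcnd
      exact List.count_erase_of_ne (ne2 (by simp [pvC, hcnd.1.2, hcnd.2]))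
    · rfl
  unfold pvStep
  rw [h2]
  split
  · rename_i hcnd
    simp only [Bool.and_eq_true] at hcnd
    exact List.count_erase_of_ne (ne1 (by simp [pvC, hcnd.1.2, hcnd.2]))
  · rfl

-- a trigger pair with v present removes exactly one copy of v
lemma pvStep_count_trig (v : Int × Int × Int × Int) (s : List (Int × Int × Int × Int))
    (q : (Int × Int × Int × Int) × (Int × Int × Int × Int))
    (h : ((q.1 == v && pvC v q.2) || (q.2 == v && pvC v q.1)) = true)
    (hv : v ∈ s) :
    (pvStep s q).count v = s.count v - 1 := by
  obtain ⟨x, y⟩ := q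
  simp only [Bool.or_eq_true, Bool.and_eq_true, beq_iff_eq] at h
  rcases h with ⟨h1, hc⟩ | ⟨h1, hc⟩
  · -- first remove fires: x = v (subst leaves x)
    subst h1
    simp only [pvC, Bool.and_eq_true] at hc
    have hne : x ≠ y := by
      intro e
      rw [← e] at hc
      simp only [decide_eq_true_eq] at hc
      omega
    unfold pvStep
    rw [if_pos (by simp [hv, hc.1, hc.2])]
    unfold pvStep2
    split
    · rw [List.count_erase_of_ne hne, List.count_erase_self]
    · rw [List.count_erase_self]
  · -- second remove fires: y = v (subst leaves y)
    subst h1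
    simp only [pvC, Bool.and_eq_true] at hc
    have hne : y ≠ x := by
      intro e
      rw [← e] at hc
      simp only [decide_eq_true_eq] at hc
      omega
    unfold pvStep
    split
    · -- the first remove also fired, erasing x ≠ y
      have hv1 : y ∈ s.erase x := (List.mem_erase_of_ne hne).mpr hv
      unfold pvStep2
      rw [if_pos (by simp [hv1, hc.1, hc.2])]
      rw [List.count_erase_self, List.count_erase_of_ne hne]
    · unfold pvStep2
      rw [if_pos (by simp [hv, hc.1, hc.2])]
      rw [List.count_erase_self]

-- the counting invariant pushed through the fold: triggers dominate multiplicity ⇒ none survive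
lemma pvFold_count_zero (p : List ((Int × Int × Int × Int) × (Int × Int × Int × Int)))
    (s : List (Int × Int × Int × Int)) (v : Int × Int × Int × Int)
    (h : s.count v ≤ pvTrig v p) : (p.foldl pvStep s).count v = 0 := by
  induction p generalizing s with
  | nil => simpa [pvTrig] using h
  | cons q p' ih =>
    simp only [List.foldl_cons]
    apply ih
    rw [pvTrig, List.countP_cons] at h
    cases ht : ((q.1 == v && pvC v q.2) || (q.2 == v && pvC v q.1))
    · rw [pvStep_count_eq v s q ht]
      simpa [ht] using h
    · by_cases hv : v ∈ s
      · rw [pvStep_count_trig v s q ht hv]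
        simp [ht] at h
        unfold pvTrig
        omega
      · have h0 : s.count v = 0 := List.count_eq_zero.mpr hv
        have := pvStep_count_le v s q
        omega

-- a value with a dominating neighbour in l has at least as many triggers in combos l as copies in l
lemma pvTrig_init (l : List (Int × Int × Int × Int)) (v g : Int × Int × Int × Int)
    (hg : g ∈ l) (hc : pvC v g = true) : l.count v ≤ pvTrig v (pvCombos l) := by
  induction l with
  | nil => simp at hg
  | cons a r ih =>
    have hgv : g ≠ v := by intro e; rw [e] at hc; simp [pvC_self] at hc
    rw [pvCombos]
    unfold pvTrig
    rw [List.countP_append]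
    rcases List.mem_cons.mp hg with rfl | hgr
    · -- g is the head; each pair (g, copy of v) in the mapped block is a trigger
      have hmap : r.count v ≤ (r.map (fun y => (g, y))).countP
          (fun q => (q.1 == v && pvC v q.2) || (q.2 == v && pvC v q.1)) := by
        rw [List.countP_map]
        unfold List.count
        apply List.countP_mono_left
        intro b _ hb
        simp only [beq_iff_eq] at hb
        simp [Function.comp, hb, hc]
      have hhead : (g :: r).count v = r.count v := by
        rw [List.count_cons]
        simp [hgv]
      rw [hhead]
      exact Nat.le_trans hmap (Nat.le_add_right _ _)
    · -- g is in the tail; IH covers the tail pairs, pair (a, g) covers a head copy of v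
      have hr := ih hgr
      unfold pvTrig at hr
      rw [List.count_cons]
      by_cases hav : a = v
      · subst hav
        have hone : 0 < (r.map (fun y => (a, y))).countP
            (fun q => (q.1 == a && pvC a q.2) || (q.2 == a && pvC a q.1)) :=
          List.countP_pos_iff.mpr ⟨(a, g), List.mem_map.mpr ⟨g, hgr, rfl⟩, by simp [hc]⟩
        have hif : (if (a == a : Bool) then 1 else 0) = 1 := by simp
        rw [hif]
        omega
      · simp only [beq_iff_eq, if_neg hav, add_zero]
        omega

-- erasing an element the filter drops anyway does not change the filtered list
lemma pvFilter_erase (good : (Int × Int × Int × Int) → Bool) (x : Int × Int × Int × Int)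
    (hx : good x = false) (s : List (Int × Int × Int × Int)) :
    (s.erase x).filter good = s.filter good := by
  induction s with
  | nil => rfl
  | cons a t ih =>
    rw [List.erase_cons]
    split
    · rename_i h
      have hax : a = x := by simpa using h
      subst hax
      simp [hx]
    · rw [List.filter_cons, List.filter_cons, ih]

-- both components of every pair of combos l are elements of l
lemma pvCombos_mem (l : List (Int × Int × Int × Int))
    (q : (Int × Int × Int × Int) × (Int × Int × Int × Int)) (hq : q ∈ pvCombos l) :
    q.1 ∈ l ∧ q.2 ∈ l := by
  induction l with
  | nil => simp [pvCombos] at hq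
  | cons a r ih =>
    rw [pvCombos, List.mem_append] at hq
    rcases hq with hq | hq
    · obtain ⟨y, hy, rfl⟩ := List.mem_map.mp hq
      exact ⟨List.mem_cons_self, List.mem_cons_of_mem _ hy⟩
    · obtain ⟨h1, h2⟩ := ih hq
      exact ⟨List.mem_cons_of_mem _ h1, List.mem_cons_of_mem _ h2⟩

theorem unduplicate_spec : Claim_equal_unduplicate := by
  intro features _
  unfold Spec_unduplicate unduplicate unduplicate_alt
  set good : (Int × Int × Int × Int) → Bool :=
    fun f => !(features.any (fun g => pvC f g)) with hgooddef
  have bad_of_C : ∀ (x y : Int × Int × Int × Int), y ∈ features → pvC x y = true →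
      good x = false := by
    intro x y hy hc
    simp only [hgooddef, Bool.not_eq_false']
    exact List.any_eq_true.mpr ⟨y, hy, hc⟩
  -- (1) safety: the fold only erases bad elements, so the good sublist is invariant
  have hsafety : ∀ (p : List ((Int × Int × Int × Int) × (Int × Int × Int × Int)))
      (s : List (Int × Int × Int × Int)),
      (∀ q ∈ p, q.1 ∈ features ∧ q.2 ∈ features) →
      (p.foldl pvStep s).filter good = s.filter good := by
    intro p
    induction p with
    | nil => intro s _; rfl
    | cons q p' ih =>
      intro s hmem
      simp only [List.foldl_cons]
      rw [ih _ (fun q hq => hmem q (List.mem_cons_of_mem _ hq))]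
      have hq := hmem q List.mem_cons_self
      have hstep2 : ∀ t : List (Int × Int × Int × Int),
          (pvStep2 t q).filter good = t.filter good := by
        intro t
        unfold pvStep2
        split
        · rename_i h2
          simp only [Bool.and_eq_true] at h2
          exact pvFilter_erase good q.2 (bad_of_C q.2 q.1 hq.1 (by simp [pvC, h2.1.2, h2.2])) t
        · rfl
      unfold pvStep
      rw [hstep2]
      split
      · rename_i h1
        simp only [Bool.and_eq_true] at h1
        exact pvFilter_erase good q.1 (bad_of_C q.1 q.2 hq.2 (by simp [pvC, h1.1.2, h1.2])) s
      · rfl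
  -- (2) completeness: every bad element is fully erased
  have hall : ∀ v ∈ (pvCombos features).foldl pvStep features, good v = true := by
    intro v hv
    cases h : good v
    · simp only [hgooddef, Bool.not_eq_false'] at h
      obtain ⟨g, hg, hc⟩ := List.any_eq_true.mp h
      have hz := pvFold_count_zero _ _ _ (pvTrig_init features v g hg hc)
      have := List.count_pos_iff.mpr hv
      omega
    · rfl
  have hfun : (fun f => !(features.any fun g => pvBeats f g)) = good :=
    funext fun f => by simp [hgooddef, pvC_eq_dominates]
  calc (pvCombos features).foldl pvStep features
      = ((pvCombos features).foldl pvStep features).filter good :=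
        (List.filter_eq_self.mpr hall).symm
    _ = features.filter good := hsafety _ _ (pvCombos_mem features)
    _ = features.filter (fun f => !(features.any (fun g => pvBeats f g))) := by
        rw [hfun]
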